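-- pv_equiv track=rewrite | github.com/almehj/crypto-learn | singh-code-book/find_common_grams.py | count_ngrams
-- ===== SOURCE A (Python) =====
-- def gen_ngrams(text,n,offset):
--     answer = []
--     i = offset
--     while i < len(text):
--         g = text[i:i+n]
--         if len(g) == n:
--             answer.append(g)
--         i += n
--
--     return answer
--
-- def count_ngrams(text,n):
--     answer = {}
--     for offset in range(n):
--         grams = gen_ngrams(text,n,offset)
--         counts = {}
--         for gram in grams:
--             if gram not in counts:
--                 counts[gram] = 0
--             counts[gram] += 1
--         answer[offset] = counts
--
--     return answer
-- ===== SOURCE B (Python) =====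
-- def count_ngrams(text, n):
--     answer = {offset: {} for offset in range(n)}
--     if n > 0:
--         for i in range(len(text) - n + 1):
--             off = i % n
--             gram = text[i:i + n]
--             answer[off][gram] = answer[off].get(gram, 0) + 1
--     return answer
-- ===== Notes on version B (the rewrite author's own statement) =====
-- stated objective: alternative
-- what changed: Replaces the per-offset nested loops (outer loop over offsets, inner stride-n while-loop re-scanning the text n times) by a single contiguous left-to-right pass over all gram start positions that dispatches each gram to its offset bucket by i % n, over buckets pre-initialized for every offset.
import Mathlib
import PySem

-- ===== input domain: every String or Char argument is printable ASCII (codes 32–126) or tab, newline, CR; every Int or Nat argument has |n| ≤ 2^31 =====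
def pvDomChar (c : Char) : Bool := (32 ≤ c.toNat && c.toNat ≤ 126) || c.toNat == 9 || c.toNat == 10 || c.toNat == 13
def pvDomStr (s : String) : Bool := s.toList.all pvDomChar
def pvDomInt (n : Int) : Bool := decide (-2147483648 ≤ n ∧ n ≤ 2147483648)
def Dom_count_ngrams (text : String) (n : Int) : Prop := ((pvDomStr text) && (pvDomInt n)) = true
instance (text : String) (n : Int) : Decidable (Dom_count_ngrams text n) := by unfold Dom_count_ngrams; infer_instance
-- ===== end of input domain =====

-- B replaces A's per-offset nested loops (one stride-n pass over the text for each offset) by a single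
-- contiguous left-to-right pass over all gram start positions, dispatching each gram to its offset bucket
-- by i % n (alternative decomposition, same cost; equivalent return value, proved below).

-- ===== PORT A =====
-- while-loop of gen_ngrams: i starts at offset, steps by n while i < len(text);
-- fuel (len+1) only guards totality — with n ≥ 1 (the only calls) it never runs out.
def genAux (cs : List Char) (n : Int) (fuel : Nat) (i : Int) (acc : List String) : List String :=
  match fuel with
  | 0 => acc
  | fuel + 1 =>
    if i < (cs.length : Int) then
      let g := PySem.List.slice cs (some i) (some (i + n))
      genAux cs n fuel (i + n) (if (g.length : Int) = n then acc ++ [String.ofList g] else acc)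
    else acc

def gen_ngrams (text : String) (n : Int) (offset : Int) : List String :=
  genAux text.toList n (text.toList.length + 1) offset []

def count_ngrams (text : String) (n : Int) : List (Int × List (String × Int)) :=
  let answer : PySem.Dict Int (PySem.Dict String Int) :=
    (PySem.List.pyRange 0 n 1).foldl
      (fun d offset =>
        let grams := gen_ngrams text n offset
        let counts : PySem.Dict String Int :=
          grams.foldl
            (fun c gram =>
              let c := if c.contains gram then c else c.insert gram 0
              c.insert gram (c.getD gram 0 + 1))
            PySem.Dict.empty
        d.insert offset counts)
      PySem.Dict.empty
  answer.items.map (fun p => (p.1, p.2.items))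

-- ===== PORT B =====
def count_ngrams_alt (text : String) (n : Int) : List (Int × List (String × Int)) :=
  let cs := text.toList
  let answer0 : PySem.Dict Int (PySem.Dict String Int) :=
    (PySem.List.pyRange 0 n 1).foldl (fun d offset => d.insert offset PySem.Dict.empty) PySem.Dict.empty
  let answer :=
    if 0 < n then
      (PySem.List.pyRange 0 ((cs.length : Int) - n + 1) 1).foldl
        (fun d i =>
          let off := PySem.Int.mod i n
          let gram := String.ofList (PySem.List.slice cs (some i) (some (i + n)))
          d.modify off PySem.Dict.empty (fun c => c.insert gram (c.getD gram 0 + 1)))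
        answer0
    else answer0
  answer.items.map (fun p => (p.1, p.2.items))

-- ===== PRECONDITION & SPEC =====
def Spec_count_ngrams (text : String) (n : Int) (out : List (Int × List (String × Int))) : Prop := out = count_ngrams_alt text n
instance (text : String) (n : Int) (out : List (Int × List (String × Int))) : Decidable (Spec_count_ngrams text n out) := by unfold Spec_count_ngrams; infer_instance

-- ===== CLAIM (what is proved, stated in full; the proofs are below) =====
def Claim_equal_count_ngrams : Prop := ∀ (text : String) (n : Int), Dom_count_ngrams text n → Spec_count_ngrams text n (count_ngrams text n)

-- ===== LEMMAS AND PROOFS =====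

-- the gram starting at position j, and the shared inner counting step
def gramF (cs : List Char) (n j : Int) : String :=
  String.ofList (PySem.List.slice cs (some j) (some (j + n)))

def innerStep (c : PySem.Dict String Int) (g : String) : PySem.Dict String Int :=
  c.insert g (c.getD g 0 + 1)

-- A's "if gram not in counts: counts[gram] = 0; counts[gram] += 1" is one overwrite-insert
lemma stepA_eq_innerStep :
    (fun (c : PySem.Dict String Int) (gram : String) =>
      let c := if c.contains gram then c else c.insert gram 0
      c.insert gram (c.getD gram 0 + 1)) = innerStep := by
  funext c g
  by_cases h : c.contains g = true
  · simp [h, innerStep]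
  · simp only [h, if_neg, Bool.false_eq_true, not_false_iff, innerStep]
    rw [PySem.Dict.getD_insert_self, PySem.Dict.insert_insert_self,
        PySem.Dict.getD_of_not_contains _ _ (by simpa using h)]

-- length of the slice cs[i:i+n]
lemma slice_len_eq_iff (cs : List Char) (n i : Int) (hi : 0 ≤ i) (hn : 1 ≤ n) :
    (((PySem.List.slice cs (some i) (some (i + n))).length : Int) = n) ↔ i + n ≤ (cs.length : Int) := by
  rw [PySem.List.length_slice]
  have h1 : ¬ i < 0 := by omega
  have h2 : ¬ i + n < 0 := by omega
  simp [PySem.List.clampIdx, h1, h2]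
  omega

-- positions ≡ i (mod n) inside [i, m) are i followed by those inside [i+n, m)
lemma filter_window (n i m : Int) (hn : 1 ≤ n) :
    (PySem.List.pyRange i m 1).filter (fun j => PySem.Int.mod j n == PySem.Int.mod i n)
      = (if i < m then [i] else [])
        ++ (PySem.List.pyRange (i + n) m 1).filter (fun j => PySem.Int.mod j n == PySem.Int.mod i n) := by
  have hmodne : ∀ j : Int, i < j → j < i + n → ¬ (PySem.Int.mod j n == PySem.Int.mod i n) = true := by
    intro j hj1 hj2 hq
    rw [beq_iff_eq, PySem.Int.mod_eq_emod_of_pos (by omega), PySem.Int.mod_eq_emod_of_pos (by omega)] at hq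
    have hd : n ∣ (j - i) := by
      apply Int.dvd_of_emod_eq_zero
      rw [Int.sub_emod, hq]
      simp
    have := Int.le_of_dvd (by omega) hd
    omega
  by_cases him : i < m
  · rw [PySem.List.pyRange_one_cons him]
    rw [List.filter_cons_of_pos (by simp)]
    simp only [if_pos him, List.cons_append, List.cons.injEq, true_and]
    by_cases h2 : i + n ≤ m
    · rw [PySem.List.pyRange_one_append (i+1) (i+n) m (by omega) h2, List.filter_append]
      have : (PySem.List.pyRange (i+1) (i+n) 1).filter (fun j => PySem.Int.mod j n == PySem.Int.mod i n) = [] := by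
        rw [List.filter_eq_nil_iff]
        intro j hj
        rw [PySem.List.mem_pyRange_one] at hj
        exact hmodne j (by omega) (by omega)
      rw [this, List.nil_append]
    · rw [PySem.List.pyRange_one_eq_nil (a := i + n) (by omega)]
      simp only [List.filter_nil, List.append_nil]
      rw [List.filter_eq_nil_iff]
      intro j hj
      rw [PySem.List.mem_pyRange_one] at hj
      exact hmodne j (by omega) (by omega)
  · rw [PySem.List.pyRange_one_eq_nil (by omega), PySem.List.pyRange_one_eq_nil (a := i + n) (by omega)]
    simp [him]

-- characterisation of A's while-loop
lemma genAux_eq (cs : List Char) (n : Int) (hn : 1 ≤ n) :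
    ∀ (fuel : Nat) (i : Int) (acc : List String), 0 ≤ i → (cs.length : Int) ≤ i + fuel →
    genAux cs n fuel i acc
      = acc ++ ((PySem.List.pyRange i ((cs.length : Int) - n + 1) 1).filter
                  (fun j => PySem.Int.mod j n == PySem.Int.mod i n)).map (gramF cs n) := by
  intro fuel
  induction fuel with
  | zero =>
    intro i acc hi hfuel
    rw [genAux, PySem.List.pyRange_one_eq_nil (by push_cast at hfuel ⊢; omega)]
    simp
  | succ fuel ih =>
    intro i acc hi hfuel
    rw [genAux]
    by_cases hiL : i < (cs.length : Int)
    · simp only [if_pos hiL]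
      rw [ih (i + n) _ (by omega) (by push_cast at hfuel ⊢; omega)]
      have hmod : PySem.Int.mod (i + n) n = PySem.Int.mod i n := by
        rw [PySem.Int.mod_eq_emod_of_pos (by omega), PySem.Int.mod_eq_emod_of_pos (by omega)]
        rw [show i + n = i + n * 1 by ring, Int.add_mul_emod_self_left]
      rw [hmod]
      rw [filter_window n i ((cs.length : Int) - n + 1) hn]
      by_cases hc : i < (cs.length : Int) - n + 1
      · rw [if_pos (slice_len_eq_iff cs n i hi hn |>.mpr (by omega)), if_pos hc]
        simp [gramF]
      · rw [if_neg (by rw [slice_len_eq_iff cs n i hi hn]; omega), if_neg hc]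
        simp
    · rw [if_neg hiL, PySem.List.pyRange_one_eq_nil (by omega)]
      simp

-- positions below off never have residue off, so the filtered scan may start at 0
lemma filter_from_zero (n off m : Int) (h0 : 0 ≤ off) (hn : off < n) :
    (PySem.List.pyRange 0 m 1).filter (fun j => PySem.Int.mod j n == off)
      = (PySem.List.pyRange off m 1).filter (fun j => PySem.Int.mod j n == off) := by
  have hne : ∀ j : Int, 0 ≤ j → j < off → ¬ (PySem.Int.mod j n == off) = true := by
    intro j hj1 hj2 hq
    rw [beq_iff_eq, PySem.Int.mod_eq_emod_of_pos (by omega), Int.emod_eq_of_lt hj1 (by omega)] at hq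
    omega
  by_cases hom : off ≤ m
  · rw [PySem.List.pyRange_one_append 0 off m h0 hom, List.filter_append]
    have : (PySem.List.pyRange 0 off 1).filter (fun j => PySem.Int.mod j n == off) = [] := by
      rw [List.filter_eq_nil_iff]
      intro j hj
      rw [PySem.List.mem_pyRange_one] at hj
      exact hne j (by omega) (by omega)
    rw [this, List.nil_append]
  · rw [PySem.List.pyRange_one_eq_nil (a := off) (by omega), List.filter_nil, List.filter_eq_nil_iff]
    intro j hj
    rw [PySem.List.mem_pyRange_one] at hj
    exact hne j (by omega) (by omega)

lemma gen_ngrams_eq (text : String) (n off : Int) (hn : 1 ≤ n) (h0 : 0 ≤ off) (hlt : off < n) :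
    gen_ngrams text n off
      = ((PySem.List.pyRange 0 ((text.toList.length : Int) - n + 1) 1).filter
          (fun j => PySem.Int.mod j n == off)).map (gramF text.toList n) := by
  rw [gen_ngrams, genAux_eq text.toList n hn _ off [] h0 (by push_cast; omega)]
  have hmod : PySem.Int.mod off n = off := by
    rw [PySem.Int.mod_eq_emod_of_pos (by omega)]
    exact Int.emod_eq_of_lt h0 hlt
  rw [hmod, List.nil_append, filter_from_zero n off _ h0 hlt]

-- one in-place modify of a present key, on the items list
lemma items_modify_of_contains {κ ν : Type} [BEq κ] [LawfulBEq κ]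
    (d : PySem.Dict κ ν) (k : κ) (dflt : ν) (f : ν → ν)
    (hc : d.contains k = true) (hnd : d.keys.Nodup) :
    (d.modify k dflt f).items = d.items.map (fun p => if p.1 == k then (p.1, f p.2) else p) := by
  have hm : d.modify k dflt f = d.insert k (f (d.getD k dflt)) := rfl
  rw [hm, PySem.Dict.items_insert_of_contains d _ hc]
  apply List.map_congr_left
  intro p hp
  by_cases h : p.1 == k
  · have hk : p.1 = k := by simpa using h
    have hpv : (p.1, p.2) ∈ d.items := by simpa using hp
    rw [if_pos h, if_pos h]
    subst hk
    rw [PySem.Dict.getD_of_mem_items d hpv hnd]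
  · rw [if_neg (by simpa using h), if_neg (by simpa using h)]

-- a fold of modifies over present keys: each bucket folds over its own filtered sub-list
lemma items_foldl_modify {κ ν β : Type} [BEq κ] [LawfulBEq κ]
    (key : β → κ) (dflt : ν) (f : β → ν → ν) :
    ∀ (l : List β) (d : PySem.Dict κ ν), d.keys.Nodup → (∀ x ∈ l, d.contains (key x) = true) →
    (l.foldl (fun d x => d.modify (key x) dflt (f x)) d).items
      = d.items.map (fun p => (p.1, (l.filter (fun x => key x == p.1)).foldl (fun v x => f x v) p.2)) := by
  intro l
  induction l with
  | nil => intro d hnd hcont; simp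
  | cons x l ih =>
    intro d hnd hcont
    rw [List.foldl_cons]
    have hcx : d.contains (key x) = true := hcont x (List.mem_cons_self ..)
    have hnd' : (d.modify (key x) dflt (f x)).keys.Nodup := by
      rw [PySem.Dict.keys_modify]
      exact PySem.Dict.nodup_keys_insert d _ _ hnd
    have hcont' : ∀ y ∈ l, (d.modify (key x) dflt (f x)).contains (key y) = true := by
      intro y hy
      rw [PySem.Dict.contains_modify]
      simp [hcont y (List.mem_cons_of_mem _ hy)]
    rw [ih _ hnd' hcont', items_modify_of_contains d _ dflt _ hcx hnd, List.map_map]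
    apply List.map_congr_left
    intro p hp
    simp only [Function.comp]
    by_cases h : key x = p.1
    · have hb : (p.1 == key x) = true := by simp [h]
      rw [if_pos hb]
      simp [h]
    · have hb : (p.1 == key x) = false := by simp [Ne.symm h]
      rw [hb]
      simp only [Bool.false_eq_true, if_false, List.filter_cons]
      have : (key x == p.1) = false := by simp [h]
      rw [this]
      simp

-- ===== VERDICT (by name: the statement is the Claim_ definition above) =====
theorem count_ngrams_spec : Claim_equal_count_ngrams := by
  intro text n _
  show count_ngrams text n = count_ngrams_alt text n

  by_cases hn : 0 < n
  · simp only [count_ngrams, count_ngrams_alt, if_pos hn, stepA_eq_innerStep]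
    -- A side: fresh inserts
    rw [PySem.Dict.items_foldl_insert_fresh (PySem.List.pyRange 0 n 1) (fun a => a)
          (fun offset => (gen_ngrams text n offset).foldl innerStep PySem.Dict.empty)
          PySem.Dict.empty (by intro a _; simp) (by simpa using PySem.List.nodup_pyRange_one 0 n)]
    -- B side: d0 then the modify fold
    have hd0items : (List.foldl (fun d (offset : Int) => d.insert offset (PySem.Dict.empty : PySem.Dict String Int)) PySem.Dict.empty (PySem.List.pyRange 0 n 1)).items
        = (PySem.List.pyRange 0 n 1).map (fun a => (a, PySem.Dict.empty)) := by
      rw [PySem.Dict.items_foldl_insert_fresh (PySem.List.pyRange 0 n 1) (fun a => a)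
            (fun _ => PySem.Dict.empty)
            PySem.Dict.empty (by intro a _; simp) (by simpa using PySem.List.nodup_pyRange_one 0 n)]
      rfl
    have hkeys : (List.foldl (fun d (offset : Int) => d.insert offset (PySem.Dict.empty : PySem.Dict String Int)) PySem.Dict.empty (PySem.List.pyRange 0 n 1)).keys
        = PySem.List.pyRange 0 n 1 := by
      simp only [PySem.Dict.keys, hd0items, List.map_map]
      exact List.map_id _
    have hnodup : (List.foldl (fun d (offset : Int) => d.insert offset (PySem.Dict.empty : PySem.Dict String Int)) PySem.Dict.empty (PySem.List.pyRange 0 n 1)).keys.Nodup := by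
      rw [hkeys]; exact PySem.List.nodup_pyRange_one 0 n
    have hcont : ∀ i ∈ PySem.List.pyRange 0 ((text.toList.length : Int) - n + 1) 1,
        (List.foldl (fun d (offset : Int) => d.insert offset (PySem.Dict.empty : PySem.Dict String Int)) PySem.Dict.empty (PySem.List.pyRange 0 n 1)).contains (PySem.Int.mod i n) = true := by
      intro i _
      rw [PySem.Dict.contains_iff_mem_keys, hkeys, PySem.List.mem_pyRange_one]
      exact ⟨PySem.Int.mod_nonneg i hn, PySem.Int.mod_lt i hn⟩
    rw [items_foldl_modify (fun i => PySem.Int.mod i n) PySem.Dict.empty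
          (fun i c => c.insert (String.ofList (PySem.List.slice text.toList (some i) (some (i + n))))
              (c.getD (String.ofList (PySem.List.slice text.toList (some i) (some (i + n)))) 0 + 1))
          (PySem.List.pyRange 0 ((text.toList.length : Int) - n + 1) 1) _ hnodup hcont, hd0items]
    have hempty : (PySem.Dict.empty : PySem.Dict Int (PySem.Dict String Int)).items = [] := rfl
    rw [hempty, List.nil_append]
    simp only [List.map_map]
    apply List.map_congr_left
    intro off hoff
    rw [PySem.List.mem_pyRange_one] at hoff
    simp only [Function.comp]
    congr 1
    rw [gen_ngrams_eq text n off (by omega) hoff.1 hoff.2, List.foldl_map]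
    rfl
  · simp only [count_ngrams, count_ngrams_alt, if_neg hn,
      PySem.List.pyRange_one_eq_nil (show n ≤ 0 by omega), List.foldl_nil]
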